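-- pv_equiv track=rewrite | github.com/tomaszchrost/adventOfCode2024 | day1/historian_hysteria.py | count_occurrences_and_remove_less_than_values
-- ===== SOURCE A (Python) =====
-- def count_occurrences_and_remove_less_than_values(a: int, b: [int]):
--     count = 0
--     for i in range(0, len(b)):
--         if a == b[i]:
--             count += 1
--         elif a < b[i]:
--             return count, b[i-count:]
--     return count, []
-- ===== SOURCE B (Python) =====
-- def count_occurrences_and_remove_less_than_values(a: int, b: [int]):
--     i = next((k for k, x in enumerate(b) if a < x), None)
--     if i is None:
--         return b.count(a), []
--     c = b[:i].count(a)
--     return c, b[i - c:]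
-- ===== Notes on version B (the rewrite author's own statement) =====
-- stated objective: idiomatic
-- what changed: A's manual index loop with an in-loop counter and early return is replaced by three library passes: next(enumerate) finds the first index with b[i] > a, list.count counts a in that prefix, then one slice.
import Mathlib
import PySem

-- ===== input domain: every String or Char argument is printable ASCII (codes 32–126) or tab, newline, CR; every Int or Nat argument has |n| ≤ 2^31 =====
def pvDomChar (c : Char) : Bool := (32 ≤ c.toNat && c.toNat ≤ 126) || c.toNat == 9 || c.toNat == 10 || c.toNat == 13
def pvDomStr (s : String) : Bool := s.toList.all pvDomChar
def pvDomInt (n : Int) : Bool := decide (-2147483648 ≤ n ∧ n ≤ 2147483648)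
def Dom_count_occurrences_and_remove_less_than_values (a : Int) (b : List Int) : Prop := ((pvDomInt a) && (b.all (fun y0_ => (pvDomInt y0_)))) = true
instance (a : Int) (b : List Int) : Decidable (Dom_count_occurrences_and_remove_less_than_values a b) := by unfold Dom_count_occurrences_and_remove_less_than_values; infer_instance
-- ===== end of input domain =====

-- B replaces A's manual index loop with two library passes: find the first index with b[i] > a
-- (next/enumerate), count a in the prefix (list.count), then slice; objective: idiomatic, same cost.

-- ===== PORT A =====
-- the 'for i in range(0, len(b))' loop with early return; b[i] is always in range, default 0 never read
def pvGoA (a : Int) (b : List Int) : List Int → Int → Int × List Int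
  | [], count => (count, [])
  | i :: rest, count =>
    let bi := PySem.List.pyGetD b i 0
    if a == bi then pvGoA a b rest (count + 1)
    else if a < bi then (count, PySem.List.slice b (some (i - count)) none)
    else pvGoA a b rest count

def count_occurrences_and_remove_less_than_values (a : Int) (b : List Int) : Int × List Int :=
  pvGoA a b (PySem.List.pyRange 0 (PySem.List.len b) 1) 0

-- ===== PORT B =====
def count_occurrences_and_remove_less_than_values_alt (a : Int) (b : List Int) : Int × List Int :=
  match b.findIdx? (fun x => a < x) with          -- next((k for k,x in enumerate(b) if a < x), None)
  | none => ((b.count a : Int), [])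
  | some i =>
    let c : Int := ((b.take i).count a : Int)     -- b[:i].count(a)
    (c, PySem.List.slice b (some ((i : Int) - c)) none)   -- b[i-c:]

-- ===== PRECONDITION & SPEC =====
def Spec_count_occurrences_and_remove_less_than_values (a : Int) (b : List Int) (out : Int × List Int) : Prop := out = count_occurrences_and_remove_less_than_values_alt a b
instance (a : Int) (b : List Int) (out : Int × List Int) : Decidable (Spec_count_occurrences_and_remove_less_than_values a b out) := by unfold Spec_count_occurrences_and_remove_less_than_values; infer_instance

-- ===== CLAIM (what is proved, stated in full; the proofs are below) =====
def Claim_equal_count_occurrences_and_remove_less_than_values : Prop := ∀ (a : Int) (b : List Int), Dom_count_occurrences_and_remove_less_than_values a b → Spec_count_occurrences_and_remove_less_than_values a b (count_occurrences_and_remove_less_than_values a b)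

-- ===== LEMMAS AND PROOFS =====

theorem pv_findIdx?_hit {p : Int → Bool} (pre s : List Int) (x : Int)
    (h : ∀ y ∈ pre, p y = false) (hx : p x = true) :
    (pre ++ x :: s).findIdx? p = some pre.length := by
  induction pre with
  | nil => simp [List.findIdx?_cons, hx]
  | cons z zs ih =>
    have hz : p z = false := h z (by simp)
    simp [List.findIdx?_cons, hz, ih (fun y hy => h y (by simp [hy]))]

theorem pv_findIdx?_none {p : Int → Bool} (l : List Int)
    (h : ∀ y ∈ l, p y = false) : l.findIdx? p = none := by
  rw [List.findIdx?_eq_none_iff]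
  intro y hy; simpa using h y hy

theorem pv_main (a : Int) (b pre suf : List Int) (hb : b = pre ++ suf)
    (hpre : ∀ y ∈ pre, ¬ a < y) :
    pvGoA a b (PySem.List.pyRange (pre.length : Int) (PySem.List.len b) 1)
      ((pre.count a : Int))
      = count_occurrences_and_remove_less_than_values_alt a b := by
  induction suf generalizing pre with
  | nil =>
    simp only [List.append_nil] at hb
    subst hb
    have hlen : PySem.List.len b = (b.length : Int) := by
      simp [PySem.List.len_eq]
    rw [hlen]
    have hr : PySem.List.pyRange (b.length : Int) (b.length : Int) 1 = [] := by
      simp [PySem.List.pyRange]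
    rw [hr]
    have hnone : b.findIdx? (fun x => a < x) = none := by
      apply pv_findIdx?_none
      intro y hy
      simpa using hpre y hy
    simp [pvGoA, count_occurrences_and_remove_less_than_values_alt, hnone]
  | cons x s ih =>
    have hlt : (pre.length : Int) < PySem.List.len b := by
      simp [PySem.List.len_eq, hb]
    rw [PySem.List.pyRange_one_cons hlt]
    have hget : PySem.List.pyGetD b (pre.length : Int) 0 = x := by
      rw [PySem.List.pyGetD_natCast]
      simp [hb, List.getD]
    rw [pvGoA, hget]
    by_cases heq : a = x
    · have hbeq : (a == x) = true := by simp [heq]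
      have h1 : ((pre.length : Int) + 1) = (((pre ++ [x]).length : Nat) : Int) := by
        simp
      have h2 : ((pre.count a : Int) + 1) = (((pre ++ [x]).count a : Nat) : Int) := by
        subst heq; simp [List.count_append]
      simp only [hbeq, if_true]
      rw [h1, h2]
      exact ih (pre ++ [x]) (by simp [hb]) (by
        intro y hy
        rcases List.mem_append.1 hy with h | h
        · exact hpre y h
        · simp at h; omega)
    · have hbeq : (a == x) = false := by simp [heq]
      by_cases hlt2 : a < x
      · have hidx : b.findIdx? (fun x => a < x) = some pre.length := by
          rw [hb]
          exact pv_findIdx?_hit pre s x (fun y hy => by simpa using hpre y hy) (by simpa)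
        have htake : b.take pre.length = pre := by
          rw [hb]; exact List.take_left
        simp [count_occurrences_and_remove_less_than_values_alt, hidx, htake, hbeq, hlt2]
      · have h1 : ((pre.length : Int) + 1) = (((pre ++ [x]).length : Nat) : Int) := by
          simp
        have h2 : ((pre.count a : Int)) = (((pre ++ [x]).count a : Nat) : Int) := by
          simp [List.count_append, List.count_singleton]; omega
        simp only [hbeq, if_false, hlt2]
        rw [h1, h2]
        exact ih (pre ++ [x]) (by simp [hb]) (by
          intro y hy
          rcases List.mem_append.1 hy with h | h
          · exact hpre y h
          · simp at h; omega)

-- ===== VERDICT (by name: the statement is the Claim_ definition above) =====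
theorem count_occurrences_and_remove_less_than_values_spec : Claim_equal_count_occurrences_and_remove_less_than_values := by
  intro a b _
  unfold Spec_count_occurrences_and_remove_less_than_values count_occurrences_and_remove_less_than_values
  simpa using pv_main a b [] b rfl (by simp)
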